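-- pv_equiv track=rewrite | github.com/Arsen1302/Code-copy-detector | TestData/solutions/problem_849_3.py | solution_849_3
-- ===== SOURCE A (Python) =====
-- from typing import List
--
-- def solution_849_3(nums: List[int], k: int) -> bool:
--     n = len(nums)
--     if n%k != 0:
--         return False
--
--     d = {}
--     for num in nums:
--         d[num] = d.get(num, 0) + 1
--
--     while d:
--         mn = min(d.keys())
--         for i in range(k):
--             if (mn+i) in d:
--                 if d[(mn+i)] == 1:
--                     del d[(mn+i)]
--                 else:
--                     d[(mn+i)] -= 1
--             else:
--                 return False
--
--     return True
-- ===== SOURCE B (Python) =====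
-- def solution_849_3(nums, k):
--     if len(nums) % k != 0:
--         return False
--     cnt = {}
--     for num in nums:
--         cnt[num] = cnt.get(num, 0) + 1
--     for v in sorted(cnt):
--         for _ in range(cnt.get(v, 0)):
--             for j in range(k):
--                 c = cnt.get(v + j, 0)
--                 if c == 0:
--                     return False
--                 if c == 1:
--                     del cnt[v + j]
--                 else:
--                     cnt[v + j] = c - 1
--     return True
-- ===== Notes on version B (the rewrite author's own statement) =====
-- stated objective: alternative
-- what changed: B replaces A's while-loop that rescans min(d.keys()) over all remaining distinct values on every round by building the counter once, sorting the distinct values once, and consuming the chains in a single left-to-right pass over the sorted values; it trades A's repeated min scans for one upfront sort.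
import Mathlib
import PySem

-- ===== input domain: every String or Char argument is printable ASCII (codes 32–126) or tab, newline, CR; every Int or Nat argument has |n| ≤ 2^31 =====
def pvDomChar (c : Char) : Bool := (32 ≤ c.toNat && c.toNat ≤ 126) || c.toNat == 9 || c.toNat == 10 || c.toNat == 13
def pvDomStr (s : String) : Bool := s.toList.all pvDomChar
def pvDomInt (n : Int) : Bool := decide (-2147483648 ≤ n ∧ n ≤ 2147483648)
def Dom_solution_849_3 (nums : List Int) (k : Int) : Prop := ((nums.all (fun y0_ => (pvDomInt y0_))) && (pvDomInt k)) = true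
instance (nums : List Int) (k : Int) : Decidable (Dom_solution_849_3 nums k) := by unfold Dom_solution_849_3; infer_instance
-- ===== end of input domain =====

-- B replaces A's per-round `min(d.keys())` rescan of the dict by sorting the distinct values once
-- and consuming the chains in ascending key order; return values agree on Pre_ (proved below).

-- ===== PORT A =====
-- d[num] = d.get(num, 0) + 1 counting loop
def pvBuildA (nums : List Int) : PySem.Dict Int Int :=
  nums.foldl (fun d num => d.insert num (d.getD num 0 + 1)) PySem.Dict.empty

-- `for i in range(k): ...` with early `return False` (none = returned False, some d = loop finished)
def pvChainA (d : PySem.Dict Int Int) (mn : Int) : List Int → Option (PySem.Dict Int Int)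
  | [] => some d
  | i :: is =>
      if d.contains (mn + i) then
        if d.getD (mn + i) 0 = 1 then pvChainA (d.erase (mn + i)) mn is
        else pvChainA (d.modify (mn + i) 0 (· - 1)) mn is
      else none

-- `while d:` as fuel recursion (Python has no fuel; `nums.length + 1` rounds always suffice when 1 ≤ k)
def pvLoopA (k : Int) : Nat → PySem.Dict Int Int → Bool
  | 0, _ => false   -- fuel exhausted: unreachable under Pre_
  | fuel + 1, d =>
      if d.size = 0 then true
      else
        match PySem.List.min? d.keys (fun x => x) with
        | none => true   -- min() of an empty sequence: unreachable (d is nonempty here)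
        | some mn =>
            match pvChainA d mn (PySem.List.pyRange 0 k 1) with
            | none => false
            | some d' => pvLoopA k fuel d'

def solution_849_3 (nums : List Int) (k : Int) : Bool :=
  if PySem.Int.mod (nums.length : Int) k ≠ 0 then false
  else pvLoopA k (nums.length + 1) (pvBuildA nums)

-- ===== PORT B =====
-- cnt[num] = cnt.get(num, 0) + 1 counting loop
def pvBuildB (nums : List Int) : PySem.Dict Int Int :=
  nums.foldl (fun cnt num => cnt.insert num (cnt.getD num 0 + 1)) PySem.Dict.empty

-- `for j in range(k): ...` with early `return False`
def pvChainB (cnt : PySem.Dict Int Int) (v : Int) : List Int → Option (PySem.Dict Int Int)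
  | [] => some cnt
  | j :: js =>
      let c := cnt.getD (v + j) 0
      if c = 0 then none
      else if c = 1 then pvChainB (cnt.erase (v + j)) v js
      else pvChainB (cnt.insert (v + j) (c - 1)) v js

-- `for _ in range(cnt.get(v, 0)): ...`
def pvRepeatB (k v : Int) : Nat → PySem.Dict Int Int → Option (PySem.Dict Int Int)
  | 0, cnt => some cnt
  | c + 1, cnt =>
      match pvChainB cnt v (PySem.List.pyRange 0 k 1) with
      | none => none
      | some cnt' => pvRepeatB k v c cnt'

-- `for v in sorted(cnt): ...`
def pvOuterB (k : Int) : List Int → PySem.Dict Int Int → Bool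
  | [], _ => true
  | v :: vs, cnt =>
      match pvRepeatB k v (cnt.getD v 0).toNat cnt with
      | none => false
      | some cnt' => pvOuterB k vs cnt'

def solution_849_3_alt (nums : List Int) (k : Int) : Bool :=
  if PySem.Int.mod (nums.length : Int) k ≠ 0 then false
  else
    let cnt := pvBuildB nums
    pvOuterB k (PySem.List.sorted cnt.keys (fun x => x) false) cnt

-- ===== PRECONDITION & SPEC =====
-- Pre_ excludes exactly the nonpositive-k inputs on which A never returns: k = 0 (ZeroDivisionError
-- at `n % k`) and k < 0 with k ∣ len(nums) and nums nonempty (`range(k)` is empty, so the while loop spins forever).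
def Pre_solution_849_3 (nums : List Int) (k : Int) : Prop :=
  k ≠ 0 ∧ (0 < k ∨ PySem.Int.mod (nums.length : Int) k ≠ 0 ∨ nums = [])
instance (nums : List Int) (k : Int) : Decidable (Pre_solution_849_3 nums k) := by
  unfold Pre_solution_849_3; infer_instance
def pvWitness_solution_849_3 : List Int × Int := ([3, 1, 2, 4, 3, 5], 3)
def Spec_solution_849_3 (nums : List Int) (k : Int) (out : Bool) : Prop := out = solution_849_3_alt nums k
instance (nums : List Int) (k : Int) (out : Bool) : Decidable (Spec_solution_849_3 nums k out) := by unfold Spec_solution_849_3; infer_instance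

-- ===== CLAIM (what is proved, stated in full; the proofs are below) =====
def Claim_equal_solution_849_3 : Prop := ∀ (nums : List Int) (k : Int), Dom_solution_849_3 nums k → Pre_solution_849_3 nums k → Spec_solution_849_3 nums k (solution_849_3 nums k)

-- ===== LEMMAS AND PROOFS =====

-- reachable dictionary states: unique keys, all stored counts positive
def pvGood (d : PySem.Dict Int Int) : Prop :=
  d.keys.Nodup ∧ ∀ p ∈ d.items, 0 < p.2

def pvTotal (d : PySem.Dict Int Int) : Nat :=
  (d.items.map (fun p => p.2.toNat)).sum

theorem pvGood_get?_pos {d : PySem.Dict Int Int} {x w : Int}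
    (hg : pvGood d) (h : d.get? x = some w) : 0 < w := by
  simp only [PySem.Dict.get?, Option.map_eq_some_iff] at h
  obtain ⟨p, hp, rfl⟩ := h
  exact hg.2 p (List.mem_of_find?_eq_some hp)

theorem pv_get?_erase_of_ne (d : PySem.Dict Int Int) {x t : Int} (h : x ≠ t) :
    (d.erase t).get? x = d.get? x := by
  obtain ⟨l⟩ := d
  simp only [PySem.Dict.erase, PySem.Dict.get?]
  congr 1
  induction l with
  | nil => rfl
  | cons p l ih =>
      by_cases hp : p.1 = t
      · simp [hp, Ne.symm h, ih]
      · rw [List.filter_cons_of_pos (by simp [hp])]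
        by_cases hx : p.1 = x
        · simp [hx]
        · simp [hx, ih]

theorem pvGood_erase {d : PySem.Dict Int Int} (hg : pvGood d) (t : Int) :
    pvGood (d.erase t) := by
  obtain ⟨hnd, hpos⟩ := hg
  constructor
  · simp only [PySem.Dict.keys, PySem.Dict.erase]
    exact hnd.sublist (List.Sublist.map _ List.filter_sublist)
  · intro p hp
    exact hpos p (List.mem_of_mem_filter hp)

theorem pv_keys_erase_mem {d : PySem.Dict Int Int} {t x : Int}
    (h : x ∈ (d.erase t).keys) : x ∈ d.keys := by
  simp only [PySem.Dict.keys, PySem.Dict.erase, List.mem_map] at h ⊢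
  obtain ⟨p, hp, rfl⟩ := h
  exact ⟨p, List.mem_of_mem_filter hp, rfl⟩

theorem pvTotal_erase {d : PySem.Dict Int Int} {t w : Int}
    (hnd : d.keys.Nodup) (h : d.get? t = some w) :
    pvTotal (d.erase t) + w.toNat = pvTotal d := by
  obtain ⟨l⟩ := d
  simp only [PySem.Dict.keys] at hnd
  simp only [PySem.Dict.get?, Option.map_eq_some_iff] at h
  obtain ⟨p, hp, rfl⟩ := h
  simp only [pvTotal, PySem.Dict.erase]
  induction l with
  | nil => simp at hp
  | cons q l ih =>
      simp only [List.map_cons, List.nodup_cons] at hnd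
      rw [List.find?_cons] at hp
      by_cases hq : (q.1 == t) = true
      · simp only [hq] at hp
        injection hp with hp; subst hp
        have : ∀ r ∈ l, ¬ (r.1 == t) = true := by
          intro r hr hrt
          apply hnd.1
          have h1 : r.1 = t := by simpa using hrt
          have h2 : q.1 = t := by simpa using hq
          rw [h2, ← h1]
          exact List.mem_map_of_mem hr
        rw [List.filter_cons_of_neg (by simpa using hq)]
        rw [List.filter_eq_self.2 (by intro r hr; simpa using this r hr)]
        simp [Nat.add_comm]
      · simp only [hq] at hp
        rw [List.filter_cons_of_pos (by simpa using hq)]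
        simp only [List.map_cons, List.sum_cons]
        have := ih hnd.2 hp
        omega

theorem pv_sum_replace (t u : Int) : ∀ (l : List (Int × Int)) (p : Int × Int),
    (l.map (fun x => x.1)).Nodup → l.find? (fun r => r.1 == t) = some p →
    ((l.map (fun r => if (r.1 == t) = true then (t, u) else r)).map (fun r => r.2.toNat)).sum + p.2.toNat
      = (l.map (fun r => r.2.toNat)).sum + u.toNat := by
  intro l
  induction l with
  | nil => intro p _ hp; simp at hp
  | cons q l ih =>
      intro p hnd hp
      simp only [List.map_cons, List.nodup_cons] at hnd
      rw [List.find?_cons] at hp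
      by_cases hq : (q.1 == t) = true
      · simp only [hq] at hp
        injection hp with hp; subst hp
        have hrest : ∀ r ∈ l, ¬ (r.1 == t) = true := by
          intro r hr hrt
          apply hnd.1
          have h1 : r.1 = t := by simpa using hrt
          have h2 : q.1 = t := by simpa using hq
          rw [h2, ← h1]
          exact List.mem_map_of_mem hr
        rw [List.map_cons, if_pos hq]
        rw [List.map_congr_left (fun r hr => if_neg (hrest r hr)), List.map_id']
        simp only [List.map_cons, List.sum_cons]
        omega
      · simp only [hq] at hp
        rw [List.map_cons, if_neg hq]
        simp only [List.map_cons, List.sum_cons]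
        have := ih p hnd.2 hp
        omega

theorem pvTotal_insert {d : PySem.Dict Int Int} {t w : Int} (u : Int)
    (hnd : d.keys.Nodup) (h : d.get? t = some w) :
    pvTotal (d.insert t u) + w.toNat = pvTotal d + u.toNat := by
  have hc : d.contains t = true := by
    rw [PySem.Dict.contains_eq_isSome_get?, h]; rfl
  simp only [PySem.Dict.keys] at hnd
  simp only [PySem.Dict.get?, Option.map_eq_some_iff] at h
  obtain ⟨p, hp, rfl⟩ := h
  simp only [pvTotal, PySem.Dict.insert, hc, if_pos]
  exact pv_sum_replace t u d.items p hnd hp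

theorem pvGood_insert {d : PySem.Dict Int Int} {t u : Int}
    (hg : pvGood d) (hu : 0 < u) : pvGood (d.insert t u) := by
  obtain ⟨hnd, hpos⟩ := hg
  refine ⟨PySem.Dict.nodup_keys_insert d t u hnd, ?_⟩
  intro p hp
  rcases (PySem.Dict.mem_items_insert _ _ _ _).1 hp with h | h
  · subst h; exact hu
  · exact hpos p h.1

theorem pv_total_ge {d : PySem.Dict Int Int} {x w : Int}
    (h : d.get? x = some w) (hw : 0 < w) : 1 ≤ pvTotal d := by
  simp only [PySem.Dict.get?, Option.map_eq_some_iff] at h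
  obtain ⟨p, hp, hw2⟩ := h
  have hmem : p.2.toNat ∈ d.items.map (fun p => p.2.toNat) :=
    List.mem_map_of_mem (List.mem_of_find?_eq_some hp)
  have h1 := List.le_sum_of_mem hmem
  have h2 : 1 ≤ p.2.toNat := by rw [hw2]; omega
  unfold pvTotal
  omega

theorem pv_min?_eq {xs : List Int} {m : Int} (hm : m ∈ xs) (hle : ∀ x ∈ xs, m ≤ x) :
    PySem.List.min? xs (fun x => x) = some m := by
  obtain ⟨m', hm'⟩ : ∃ m', PySem.List.min? xs (fun x => x) = some m' := by
    cases h : PySem.List.min? xs (fun x => x) with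
    | none => rw [PySem.List.min?_eq_none_iff] at h; subst h; simp at hm
    | some m' => exact ⟨m', rfl⟩
  have h1 : m' ∈ xs := PySem.List.min?_mem hm'
  have h2 : ∀ y ∈ xs, m' ≤ y := PySem.List.min?_isMin hm'
  have : m' = m := le_antisymm (h2 m hm) (hle m' h1)
  rw [hm', this]

theorem pv_getD_eq_zero_iff {d : PySem.Dict Int Int} (hg : pvGood d) (x : Int) :
    (d.getD x 0 = 0) ↔ d.contains x = false := by
  rw [PySem.Dict.getD_eq_get?_getD]
  cases h : d.get? x with
  | none =>
      have hc : d.contains x = false := by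
        rw [PySem.Dict.contains_eq_isSome_get?, h]; rfl
      simp [hc]
  | some w =>
      have hw := pvGood_get?_pos hg h
      simp only [Option.getD_some]
      constructor
      · intro h0; omega
      · intro hc
        rw [PySem.Dict.contains_eq_isSome_get?, h] at hc
        simp at hc

theorem pv_get?_erase_self (d : PySem.Dict Int Int) (t : Int) :
    (d.erase t).get? t = none := by
  obtain ⟨l⟩ := d
  simp only [PySem.Dict.erase, PySem.Dict.get?, Option.map_eq_none_iff]
  rw [List.find?_eq_none]
  intro p hp
  have := List.of_mem_filter hp
  simpa using this

theorem pv_step_facts {d : PySem.Dict Int Int} {x : Int} (hg : pvGood d)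
    (hne : ¬ d.getD x 0 = 0) :
    d.get? x = some (d.getD x 0) ∧ 0 < d.getD x 0 := by
  cases h : d.get? x with
  | none => rw [PySem.Dict.getD_eq_get?_getD, h] at hne; simp at hne
  | some w =>
      have hw := pvGood_get?_pos hg h
      rw [PySem.Dict.getD_eq_get?_getD, h]
      exact ⟨rfl, hw⟩

theorem pvChain_eq (v : Int) : ∀ (l : List Int) (d : PySem.Dict Int Int), pvGood d →
    pvChainA d v l = pvChainB d v l := by
  intro l
  induction l with
  | nil => intro d _; rfl
  | cons j js ih =>
      intro d hg
      simp only [pvChainA, pvChainB]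
      by_cases h0 : d.getD (v + j) 0 = 0
      · have hc : d.contains (v + j) = false := (pv_getD_eq_zero_iff hg _).1 h0
        simp [hc, h0]
      · have hc : d.contains (v + j) = true := by
          cases hcc : d.contains (v + j) with
          | false => exact absurd ((pv_getD_eq_zero_iff hg _).2 hcc) h0
          | true => rfl
        obtain ⟨hget, hpos⟩ := pv_step_facts hg h0
        have hmod : d.modify (v + j) 0 (· - 1) = d.insert (v + j) (d.getD (v + j) 0 - 1) := rfl
        by_cases h1 : d.getD (v + j) 0 = 1
        · simp only [hc, h1, hmod, if_true]
          exact ih _ (pvGood_erase hg _)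
        · simp only [hc, hmod, if_true, if_neg h0, if_neg h1]
          exact ih _ (pvGood_insert hg (by omega))

theorem pvChainB_props (v : Int) : ∀ (l : List Int) (d d1 : PySem.Dict Int Int), pvGood d →
    pvChainB d v l = some d1 →
    pvGood d1 ∧ (∀ x ∈ d1.keys, x ∈ d.keys) ∧ pvTotal d1 ≤ pvTotal d ∧
      (∀ x : Int, (∀ j ∈ l, v + j ≠ x) → d1.get? x = d.get? x) := by
  intro l
  induction l with
  | nil =>
      intro d d1 hg h
      simp only [pvChainB] at h
      injection h with h; subst h
      exact ⟨hg, fun x hx => hx, le_refl _, fun x _ => rfl⟩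
  | cons j js ih =>
      intro d d1 hg h
      simp only [pvChainB] at h
      by_cases h0 : d.getD (v + j) 0 = 0
      · simp [h0] at h
      · obtain ⟨hget, hpos⟩ := pv_step_facts hg h0
        by_cases h1 : d.getD (v + j) 0 = 1
        · rw [if_neg h0, if_pos h1] at h
          obtain ⟨hg1, hk1, ht1, hp1⟩ := ih _ _ (pvGood_erase hg _) h
          refine ⟨hg1, ?_, ?_, ?_⟩
          · intro x hx; exact pv_keys_erase_mem (hk1 x hx)
          · have := pvTotal_erase hg.1 hget
            omega
          · intro x hx
            rw [hp1 x (fun j' hj' => hx j' (List.mem_cons_of_mem _ hj'))]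
            exact pv_get?_erase_of_ne d (Ne.symm (hx j (List.mem_cons_self)))
        · rw [if_neg h0, if_neg h1] at h
          have hgi : pvGood (d.insert (v + j) (d.getD (v + j) 0 - 1)) :=
            pvGood_insert hg (by omega)
          obtain ⟨hg1, hk1, ht1, hp1⟩ := ih _ _ hgi h
          refine ⟨hg1, ?_, ?_, ?_⟩
          · intro x hx
            rcases (PySem.Dict.mem_keys_insert _ _ _ _).1 (hk1 x hx) with h' | h'
            · subst h'
              have hct : d.contains (v + j) = true := by
                rw [PySem.Dict.contains_eq_isSome_get?, hget]; rfl
              exact (PySem.Dict.contains_iff_mem_keys _ _).1 hct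
            · exact h'
          · have := pvTotal_insert (d.getD (v + j) 0 - 1) hg.1 hget
            have h2 : (d.getD (v + j) 0 - 1).toNat < (d.getD (v + j) 0).toNat := by omega
            omega
          · intro x hx
            rw [hp1 x (fun j' hj' => hx j' (List.mem_cons_of_mem _ hj'))]
            exact PySem.Dict.get?_insert_of_ne d _ (Ne.symm (hx j (List.mem_cons_self)))

theorem pvChainB_total_lt (v j : Int) (l : List Int) {d d1 : PySem.Dict Int Int}
    (hg : pvGood d) (h : pvChainB d v (j :: l) = some d1) : pvTotal d1 < pvTotal d := by
  simp only [pvChainB] at h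
  by_cases h0 : d.getD (v + j) 0 = 0
  · simp [h0] at h
  · obtain ⟨hget, hpos⟩ := pv_step_facts hg h0
    by_cases h1 : d.getD (v + j) 0 = 1
    · rw [if_neg h0, if_pos h1] at h
      obtain ⟨_, _, ht1, _⟩ := pvChainB_props v l _ _ (pvGood_erase hg _) h
      have := pvTotal_erase hg.1 hget
      have := pv_total_ge hget hpos
      omega
    · rw [if_neg h0, if_neg h1] at h
      obtain ⟨_, _, ht1, _⟩ := pvChainB_props v l _ _ (pvGood_insert hg (by omega)) h
      have := pvTotal_insert (d.getD (v + j) 0 - 1) hg.1 hget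
      have h2 : (d.getD (v + j) 0 - 1).toNat < (d.getD (v + j) 0).toNat := by omega
      omega

theorem pvChainB_getD_v {k v : Int} (hk : 1 ≤ k) {d d1 : PySem.Dict Int Int}
    (hg : pvGood d) (h : pvChainB d v (PySem.List.pyRange 0 k 1) = some d1) :
    d1.getD v 0 = d.getD v 0 - 1 := by
  rw [PySem.List.pyRange_one_cons (by omega : (0:Int) < k)] at h
  simp only [pvChainB, add_zero] at h
  have hrest : ∀ x : Int, (∀ j' ∈ PySem.List.pyRange (0 + 1) k, v + j' ≠ x) →
      True := fun _ _ => trivial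
  by_cases h0 : d.getD v 0 = 0
  · simp [h0] at h
  · obtain ⟨hget, hpos⟩ := pv_step_facts hg h0
    have hne : ∀ j' ∈ PySem.List.pyRange (0 + 1) k, v + j' ≠ v := by
      intro j' hj'
      have := PySem.List.mem_pyRange_one.1 hj'
      omega
    by_cases h1 : d.getD v 0 = 1
    · rw [if_neg h0, if_pos h1] at h
      obtain ⟨_, _, _, hp⟩ := pvChainB_props v _ _ _ (pvGood_erase hg _) h
      rw [PySem.Dict.getD_eq_get?_getD, hp v hne, pv_get?_erase_self]
      simp [h1]
    · rw [if_neg h0, if_neg h1] at h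
      obtain ⟨_, _, _, hp⟩ := pvChainB_props v _ _ _ (pvGood_insert hg (by omega)) h
      rw [PySem.Dict.getD_eq_get?_getD, hp v hne, PySem.Dict.get?_insert_self]
      rfl

theorem pv_size_ne_zero {d : PySem.Dict Int Int} {x : Int} (h : x ∈ d.keys) :
    ¬ d.size = 0 := by
  simp only [PySem.Dict.keys, List.mem_map] at h
  obtain ⟨p, hp, _⟩ := h
  simp only [PySem.Dict.size]
  intro hlen
  rw [List.length_eq_zero_iff] at hlen
  rw [hlen] at hp
  exact (List.not_mem_nil) hp

theorem pv_size_zero {d : PySem.Dict Int Int} (h : ∀ x ∈ d.keys, False) :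
    d.size = 0 := by
  cases hd : d.items with
  | nil => simp [PySem.Dict.size, hd]
  | cons p l =>
      exfalso
      exact h p.1 (by
        simp only [PySem.Dict.keys, hd, List.map_cons]
        exact List.mem_cons_self)

theorem pv_getD_nonneg {d : PySem.Dict Int Int} (hg : pvGood d) (x : Int) :
    0 ≤ d.getD x 0 := by
  rw [PySem.Dict.getD_eq_get?_getD]
  cases h : d.get? x with
  | none => simp
  | some w => have := pvGood_get?_pos hg h; simpa using le_of_lt this

theorem pv_sub {k : Int} (hk : 1 ≤ k) (v : Int) (vs' : List Int)
    (cont : ∀ (d : PySem.Dict Int Int) (fuel : Nat), pvGood d →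
      (∀ x ∈ d.keys, x ∈ vs') → pvTotal d < fuel → pvLoopA k fuel d = pvOuterB k vs' d)
    (hv : ∀ x ∈ vs', v < x) :
    ∀ (c : Nat) (d : PySem.Dict Int Int) (fuel : Nat), pvGood d →
      (∀ x ∈ d.keys, x = v ∨ x ∈ vs') → d.getD v 0 = (c : Int) → pvTotal d < fuel →
      pvLoopA k fuel d = (match pvRepeatB k v c d with
        | none => false
        | some d' => pvOuterB k vs' d') := by
  intro c
  induction c with
  | zero =>
      intro d fuel hg hks hc hf
      have hcf : d.contains v = false := (pv_getD_eq_zero_iff hg v).1 (by exact_mod_cast hc)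
      have hks' : ∀ x ∈ d.keys, x ∈ vs' := by
        intro x hx
        rcases hks x hx with rfl | h
        · rw [← PySem.Dict.contains_iff_mem_keys] at hx
          rw [hcf] at hx; cases hx
        · exact h
      exact cont d fuel hg hks' hf
  | succ c ih =>
      intro d fuel hg hks hc hf
      have h0 : ¬ d.getD v 0 = 0 := by omega
      obtain ⟨hget, hpos⟩ := pv_step_facts hg h0
      have hvk : v ∈ d.keys := by
        rw [← PySem.Dict.contains_iff_mem_keys]
        rw [PySem.Dict.contains_eq_isSome_get?, hget]; rfl
      have hsz : ¬ d.size = 0 := pv_size_ne_zero hvk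
      have htot : 1 ≤ pvTotal d := pv_total_ge hget hpos
      cases fuel with
      | zero => omega
      | succ f =>
          simp only [pvLoopA, if_neg hsz]
          have hmin : PySem.List.min? d.keys (fun x => x) = some v := by
            apply pv_min?_eq hvk
            intro x hx
            rcases hks x hx with rfl | h
            · exact le_refl _
            · exact le_of_lt (hv x h)
          simp only [hmin, pvChain_eq v _ d hg]
          cases hchain : pvChainB d v (PySem.List.pyRange 0 k 1) with
          | none => simp only [pvRepeatB, hchain]
          | some d1 =>
              simp only [pvRepeatB, hchain]
              obtain ⟨hg1, hk1, ht1, _⟩ := pvChainB_props v _ d d1 hg hchain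
              have hlt : pvTotal d1 < pvTotal d := by
                have hcons := hchain
                rw [PySem.List.pyRange_one_cons (by omega : (0:Int) < k)] at hcons
                exact pvChainB_total_lt v 0 _ hg hcons
              apply ih d1 f hg1
              · intro x hx; exact hks x (hk1 x hx)
              · rw [pvChainB_getD_v hk hg hchain, hc]
                push_cast; ring
              · omega

theorem pv_main {k : Int} (hk : 1 ≤ k) :
    ∀ (vs : List Int) (d : PySem.Dict Int Int) (fuel : Nat), pvGood d →
      vs.Pairwise (· < ·) → (∀ x ∈ d.keys, x ∈ vs) → pvTotal d < fuel →
      pvLoopA k fuel d = pvOuterB k vs d := by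
  intro vs
  induction vs with
  | nil =>
      intro d fuel hg _ hks hf
      have hsz : d.size = 0 := pv_size_zero (fun x hx => by simpa using hks x hx)
      cases fuel with
      | zero => omega
      | succ f => simp only [pvLoopA, if_pos hsz, pvOuterB]
  | cons v vs' ih =>
      intro d fuel hg hp hks hf
      have hv : ∀ x ∈ vs', v < x := fun x hx => List.rel_of_pairwise_cons hp hx
      have hc : d.getD v 0 = ((d.getD v 0).toNat : Int) := by
        have := pv_getD_nonneg hg v
        omega
      have := pv_sub hk v vs'
        (fun d fuel hg hks hf => ih d fuel hg (List.Pairwise.of_cons hp) hks hf)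
        hv ((d.getD v 0).toNat) d fuel hg (fun x hx => List.mem_cons.1 (hks x hx)) hc hf
      rw [this]
      simp only [pvOuterB]

theorem pvGood_counter (nums : List Int) : pvGood (PySem.Dict.counter nums) := by
  refine ⟨PySem.Dict.nodup_keys_counter nums, ?_⟩
  intro p hp
  rw [PySem.Dict.items_counter] at hp
  rw [List.mem_map] at hp
  obtain ⟨x, hx, rfl⟩ := hp
  have hxm : x ∈ nums := (PySem.Set.mem_ofList nums x).1 hx
  have h := List.count_pos_iff.2 hxm
  show (0:Int) < (nums.count x : Int)
  exact_mod_cast h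

theorem pvTotal_counter (nums : List Int) : pvTotal (PySem.Dict.counter nums) = nums.length := by
  unfold pvTotal
  rw [PySem.Dict.items_counter, List.map_map]
  have hmap : ((fun (p : Int × Int) => p.2.toNat) ∘ fun x => (x, (nums.count x : Int)))
      = fun x => nums.count x := by
    funext x; simp
  rw [hmap]
  have hperm : (PySem.Set.ofList nums).Perm nums.dedup := by
    refine (List.perm_ext_iff_of_nodup (PySem.Set.nodup_ofList _) (List.nodup_dedup _)).2 ?_
    intro a
    rw [PySem.Set.mem_ofList, List.mem_dedup]
  rw [(hperm.map _).sum_eq]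
  exact List.sum_map_count_dedup_eq_length nums


theorem pv_final : ∀ (nums : List Int) (k : Int), Pre_solution_849_3 nums k →
    solution_849_3 nums k = solution_849_3_alt nums k := by
  intro nums k hpre
  unfold Pre_solution_849_3 at hpre
  unfold solution_849_3 solution_849_3_alt
  by_cases hm : PySem.Int.mod (nums.length : Int) k = 0
  · rw [if_neg (by simpa using hm), if_neg (by simpa using hm)]
    obtain ⟨hk0, hd⟩ := hpre
    rcases hd with hkpos | hmne | hnil
    · have hbA : pvBuildA nums = PySem.Dict.counter nums :=
        PySem.Dict.foldl_insert_getD_add_one_eq_counter nums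
      have hbB : pvBuildB nums = PySem.Dict.counter nums :=
        PySem.Dict.foldl_insert_getD_add_one_eq_counter nums
      show pvLoopA k (nums.length + 1) (pvBuildA nums)
        = pvOuterB k (PySem.List.sorted (pvBuildB nums).keys (fun x => x) false) (pvBuildB nums)
      rw [hbA, hbB]
      apply pv_main (by omega) _ _ _ (pvGood_counter nums)
      · rw [PySem.Dict.keys_counter]
        exact PySem.List.sorted_ofList_pairwise_lt nums
      · intro x hx
        rw [PySem.List.mem_sorted]
        exact hx
      · rw [pvTotal_counter]
        omega
    · exact absurd hm hmne
    · subst hnil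
      rfl
  · rw [if_pos (by simpa using hm), if_pos (by simpa using hm)]

-- ===== VERDICT (by name: the statement is the Claim_ definition above) =====
theorem solution_849_3_spec : Claim_equal_solution_849_3 := by
  intro nums k _ hpre
  unfold Spec_solution_849_3
  exact pv_final nums k hpre
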